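-- pv_equiv track=rewrite | github.com/MinTuyen/DataStructure | traversals.py | column_major_traversal
-- ===== SOURCE A (Python) =====
-- def column_major_traversal (grid):
--     """traversal column"""
--     rows=len(grid)
--     cols=len(grid[0])
--     result = []
--     for c in range (cols):
--         for r in range(rows):
--             result.append((r,c))
--     return result
-- ===== SOURCE B (Python) =====
-- def column_major_traversal(grid):
--     """traversal column"""
--     rows = len(grid)
--     cols = len(grid[0])
--
--     def build(c):
--         if c <= 0:
--             return []
--         return build(c - 1) + [(r, c - 1) for r in range(rows)]
--
--     return build(cols)
-- ===== Notes on version B (the rewrite author's own statement) =====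
-- stated objective: alternative
-- what changed: Replaced the nested imperative loops with an accumulator list by a recursive decomposition on the column count that builds each column as a comprehension and concatenates them.
-- outside the precondition, e.g. on column_major_traversal([]): A raises IndexError, B raises IndexError
import Mathlib
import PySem

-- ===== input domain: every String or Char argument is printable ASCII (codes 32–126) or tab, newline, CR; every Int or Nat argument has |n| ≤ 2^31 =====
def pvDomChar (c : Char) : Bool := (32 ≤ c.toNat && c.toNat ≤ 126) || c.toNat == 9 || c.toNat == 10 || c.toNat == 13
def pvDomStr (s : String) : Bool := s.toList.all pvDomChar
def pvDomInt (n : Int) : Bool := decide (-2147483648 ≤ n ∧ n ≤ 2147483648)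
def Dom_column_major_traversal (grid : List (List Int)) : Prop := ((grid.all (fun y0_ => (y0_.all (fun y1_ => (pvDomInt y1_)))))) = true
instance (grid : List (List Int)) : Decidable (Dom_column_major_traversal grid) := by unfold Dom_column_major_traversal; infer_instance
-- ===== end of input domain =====

-- B replaces A's nested imperative loops by a recursive decomposition on the column count,
-- building each column as a comprehension and concatenating; alternative decomposition, same order.

-- ===== PORT A =====
def column_major_traversal (grid : List (List Int)) : List (Int × Int) :=
  let rows : Int := grid.length
  let cols : Int := (PySem.List.pyGetD grid 0 []).length
  (PySem.List.pyRange 0 cols 1).foldl (fun result c =>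
    (PySem.List.pyRange 0 rows 1).foldl (fun result r => result ++ [(r, c)]) result) []

-- ===== PORT B =====
-- Python's recursive `build(c)`: base case c ≤ 0 ↦ Nat 0; `build(c-1) + [(r, c-1) for r in range(rows)]`.
def cmtBuild (rows : Int) : Nat → List (Int × Int)
  | 0 => []
  | Nat.succ c => cmtBuild rows c ++ (PySem.List.pyRange 0 rows 1).map (fun r => (r, (c : Int)))

def column_major_traversal_alt (grid : List (List Int)) : List (Int × Int) :=
  let rows : Int := grid.length
  let cols : Int := (PySem.List.pyGetD grid 0 []).length
  cmtBuild rows cols.toNat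

-- ===== PRECONDITION & SPEC =====
-- Pre_ excludes only the empty grid, on which A's grid[0] raises IndexError (B raises there too).
def Pre_column_major_traversal (grid : List (List Int)) : Prop := grid ≠ []
instance (grid : List (List Int)) : Decidable (Pre_column_major_traversal grid) := by unfold Pre_column_major_traversal; infer_instance
def pvWitness_column_major_traversal : List (List Int) := [[1, 2], [3, 4]]

def Spec_column_major_traversal (grid : List (List Int)) (out : List (Int × Int)) : Prop := out = column_major_traversal_alt grid
instance (grid : List (List Int)) (out : List (Int × Int)) : Decidable (Spec_column_major_traversal grid out) := by unfold Spec_column_major_traversal; infer_instance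

-- ===== CLAIM (what is proved, stated in full; the proofs are below) =====
def Claim_equal_column_major_traversal : Prop := ∀ (grid : List (List Int)), Dom_column_major_traversal grid → Pre_column_major_traversal grid → Spec_column_major_traversal grid (column_major_traversal grid)

-- ===== LEMMAS AND PROOFS =====

-- closed form of A's nested loops
theorem colmaj_A_closed (R C : Nat) :
    (PySem.List.pyRange 0 (C : Int) 1).foldl (fun result c =>
      (PySem.List.pyRange 0 (R : Int) 1).foldl (fun result r => result ++ [(r, c)]) result) [] =
    (List.range C).flatMap (fun c : Nat => (List.range R).map (fun r : Nat => ((r : Int), (c : Int)))) := by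
  have hinner : ∀ (c : Int) (acc : List (Int × Int)),
      (PySem.List.pyRange 0 (R : Int) 1).foldl (fun result r => result ++ [(r, c)]) acc =
      acc ++ (List.range R).map (fun r : Nat => ((r : Int), c)) := by
    intro c acc
    rw [PySem.List.foldl_append_singleton_eq_map, PySem.List.pyRange_zero_nat, List.map_map]
    rfl
  calc (PySem.List.pyRange 0 (C : Int) 1).foldl (fun result c =>
        (PySem.List.pyRange 0 (R : Int) 1).foldl (fun result r => result ++ [(r, c)]) result) []
      = (PySem.List.pyRange 0 (C : Int) 1).foldl (fun result c =>
        result ++ (List.range R).map (fun r : Nat => ((r : Int), c))) [] := by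
        apply PySem.List.foldl_congr_mem
        intro acc c _
        exact hinner c acc
    _ = (List.range C).flatMap (fun c : Nat => (List.range R).map (fun r : Nat => ((r : Int), (c : Int)))) := by
        rw [PySem.List.foldl_append_eq_flatMap, PySem.List.pyRange_zero_nat, List.flatMap_map]
        rfl

-- closed form of B's recursion
theorem colmaj_B_closed (R C : Nat) :
    cmtBuild (R : Int) C =
    (List.range C).flatMap (fun c : Nat => (List.range R).map (fun r : Nat => ((r : Int), (c : Int)))) := by
  induction C with
  | zero => simp [cmtBuild]
  | succ c ih =>
    rw [cmtBuild, ih, List.range_succ, List.flatMap_append,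
        PySem.List.pyRange_zero_nat, List.map_map]
    simp only [List.flatMap_cons, List.flatMap_nil, List.append_nil]
    rfl

-- ===== VERDICT (by name: the statement is the Claim_ definition above) =====
theorem column_major_traversal_spec : Claim_equal_column_major_traversal := by
  intro grid _ _
  unfold Spec_column_major_traversal column_major_traversal column_major_traversal_alt
  simp only [Int.toNat_natCast]
  rw [colmaj_A_closed grid.length (PySem.List.pyGetD grid 0 []).length,
      colmaj_B_closed grid.length (PySem.List.pyGetD grid 0 []).length]
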